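-- pv_equiv track=rewrite | github.com/ian-poe/Poe_DSP539_Exam4_Python | predict_genome.py | count_total_genomes
-- ===== SOURCE A (Python) =====
-- def count_total_genomes(s, k):                                                                #Function for Frequency of Genomes in the List
--     """
--     Extracts and returns a list of unique genome substrings with a count of how many times it was seen.
--
--     This function takes a string and identifies all unique substrings of length k and a count of how many times it was seen.
--     It returns a list of unique genome substrings with a count for occurance for the original genome
--
--     Arguments:
--         s : String of the Genome Sequence.
--         k : Substring Length.
--
--     Returns:
--         A list of unique substrings of length k with count for the input sequence.
--     """
--     total_counts = {}                                                                        #Empty dictionary to Store Total Count or Each Unique Genome Substring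
--     for i in range(len(s) - k + 1):                                                          #For Loop to cycle through each genome substring of length k
--         original_substring = s[i:i + k]                                                      #Identifys Spicific substring for the loop
--
--         if original_substring not in total_counts:                                           #If Substring Not in the dictionary "total_counts"
--             total_counts[original_substring] = 0                                             #It is added with a value of 0
--
--         total_counts[original_substring] += 1                                                #1 is added to the substring count for the specific substring
--     return total_counts                                                                      #Returns the Dictionary after the string is completed
-- ===== SOURCE B (Python) =====
-- def count_total_genomes(s, k):
--     subs = [s[i:i + k] for i in range(len(s) - k + 1)]
--     return {u: subs.count(u) for u in dict.fromkeys(subs)}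
-- ===== Notes on version B (the rewrite author's own statement) =====
-- stated objective: alternative
-- what changed: A builds the counts in one pass with an if-absent-insert-then-increment dict loop; B first materialises the list of all k-substrings, deduplicates it preserving first occurrence (dict.fromkeys), and maps each unique substring to its list.count.
import Mathlib
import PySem

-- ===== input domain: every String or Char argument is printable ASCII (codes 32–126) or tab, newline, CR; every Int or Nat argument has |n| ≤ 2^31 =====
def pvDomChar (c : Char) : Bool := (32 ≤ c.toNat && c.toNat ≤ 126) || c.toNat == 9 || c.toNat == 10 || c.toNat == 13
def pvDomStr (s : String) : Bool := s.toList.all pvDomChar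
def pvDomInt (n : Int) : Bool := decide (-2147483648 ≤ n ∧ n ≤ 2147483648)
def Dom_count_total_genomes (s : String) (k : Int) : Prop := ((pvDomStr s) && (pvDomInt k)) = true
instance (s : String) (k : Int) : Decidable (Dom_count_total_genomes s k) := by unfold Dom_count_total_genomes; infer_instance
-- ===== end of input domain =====

-- B replaces A's one-pass dict-building loop by building the substring list once, then
-- mapping each first-occurrence-deduplicated substring to its count (objective: alternative).


-- ===== PORT A =====
-- literal port of A: for i in range(len(s)-k+1): sub = s[i:i+k]; if sub not in d: d[sub] = 0; d[sub] += 1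
def count_total_genomes (s : String) (k : Int) : List (String × Int) :=
  ((PySem.List.pyRange 0 (PySem.Str.len s - k + 1) 1).foldl
    (fun d i =>
      let sub := PySem.Str.slice s (some i) (some (i + k))
      let d := if d.contains sub then d else d.insert sub 0
      d.insert sub (d.getD sub 0 + 1))
    PySem.Dict.empty).items

-- ===== PORT B =====
-- literal port of B: subs = [s[i:i+k] for i in range(len(s)-k+1)]; {u: subs.count(u) for u in dict.fromkeys(subs)}
def count_total_genomes_alt (s : String) (k : Int) : List (String × Int) :=
  let subs := (PySem.List.pyRange 0 (PySem.Str.len s - k + 1) 1).map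
    (fun i => PySem.Str.slice s (some i) (some (i + k)))
  (PySem.List.dedup subs).map (fun u => (u, (subs.count u : Int)))

-- ===== PRECONDITION & SPEC =====
def Spec_count_total_genomes (s : String) (k : Int) (out : List (String × Int)) : Prop := out = count_total_genomes_alt s k
instance (s : String) (k : Int) (out : List (String × Int)) : Decidable (Spec_count_total_genomes s k out) := by unfold Spec_count_total_genomes; infer_instance

-- ===== CLAIM (what is proved, stated in full; the proofs are below) =====
def Claim_equal_count_total_genomes : Prop := ∀ (s : String) (k : Int), Dom_count_total_genomes s k → Spec_count_total_genomes s k (count_total_genomes s k)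

-- ===== LEMMAS AND PROOFS =====

-- overwriting a freshly appended key edits it in place
theorem pv_insert_insert (d : PySem.Dict String Int) (x : String) (v : Int)
    (h : d.contains x = false) : (d.insert x 0).insert x v = d.insert x v := by
  have hm : ∀ p ∈ d.items, p.1 ≠ x := by
    intro p hp hpx
    have hk := PySem.Dict.mem_keys_of_mem_items (d := d) hp
    have hc := PySem.Dict.contains_iff_mem_keys (d := d) (k := x)
    simp [h] at hc
    exact hc (hpx ▸ hk)
  simp only [PySem.Dict.insert, h, Bool.false_eq_true, reduceIte, PySem.Dict.contains_mk,
    List.any_append, List.any_cons, BEq.rfl, List.any_nil, Bool.or_false, Bool.or_true,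
    beq_iff_eq, List.map_append, List.map_cons, List.map_nil, PySem.Dict.mk.injEq,
    List.append_cancel_right_eq]
  calc List.map (fun p => if p.1 = x then (x, v) else p) d.items
      = List.map id d.items := List.map_congr_left (fun p hp => by simp [hm p hp])
    _ = d.items := List.map_id d.items

-- A's loop body ('if absent insert 0, then add 1') is the standard counting insert.
theorem pv_stepA_eq (d : PySem.Dict String Int) (x : String) :
    (let d' := if d.contains x then d else d.insert x 0;
     d'.insert x (d'.getD x 0 + 1)) = d.insert x (d.getD x 0 + 1) := by
  by_cases h : d.contains x = true
  · simp [h]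
  · have h' : d.contains x = false := by simpa using h
    have hg : d.getD x 0 = 0 := by
      simp [PySem.Dict.getD_eq_get?_getD,
        (PySem.Dict.get?_eq_none_iff_contains (d := d) (k := x)).mpr h']
    simp only [h', Bool.false_eq_true, reduceIte, PySem.Dict.getD_insert_self, hg]
    exact pv_insert_insert d x (0 + 1) h'

-- the whole loop, over any list of (already-sliced) substrings
theorem pv_loop_eq (l : List Int) (g : Int → String) :
    (l.foldl (fun d i =>
        let sub := g i
        let d' := if d.contains sub then d else d.insert sub 0
        d'.insert sub (d'.getD sub 0 + 1)) PySem.Dict.empty).items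
    = (PySem.List.dedup (l.map g)).map (fun u => (u, ((l.map g).count u : Int))) := by
  have hstep : (fun (d : PySem.Dict String Int) (i : Int) =>
      let sub := g i
      let d' := if d.contains sub then d else d.insert sub 0
      d'.insert sub (d'.getD sub 0 + 1))
      = fun d i => d.insert (g i) (d.getD (g i) 0 + 1) :=
    funext fun d => funext fun i => pv_stepA_eq d (g i)
  rw [hstep, ← List.foldl_map (f := g) (g := fun (d : PySem.Dict String Int) u => d.insert u (d.getD u 0 + 1)),
    PySem.Dict.foldl_insert_getD_add_one_eq_counter, PySem.Dict.items_counter,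
    PySem.List.dedup_eq_ofList]

-- ===== VERDICT (by name: the statement is the Claim_ definition above) =====
theorem count_total_genomes_spec : Claim_equal_count_total_genomes := by
  intro s k _
  exact pv_loop_eq (PySem.List.pyRange 0 (PySem.Str.len s - k + 1) 1)
    (fun i => PySem.Str.slice s (some i) (some (i + k)))
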